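-- pv_equiv track=rewrite | github.com/nikhil-1718/HistoReactor | modules/aspohe_module.py | startify_the_image
-- ===== SOURCE A (Python) =====
-- def startify_the_image(image, alpha, beta, M, N):
--     alpha = 1
--     """Only alpha=1 is supported."""
--     stratified_regions = []
--     row_size = M // beta
--     col_size = N // beta
--     row_remainder = M % beta
--     col_remainder = N % beta
--     row_start = 0
--     for i in range(beta):
--         extra_row = 1 if i < row_remainder else 0
--         block_height = row_size + extra_row
--         row_end = row_start + block_height - 1
--         col_start = 0
--         for j in range(beta):
--             extra_col = 1 if j < col_remainder else 0
--             block_width = col_size + extra_col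
--             col_end = col_start + block_width - 1
--             stratified_regions.append([row_start, col_start, row_end, col_end])
--             col_start = col_end + 1
--         row_start = row_end + 1
--     return stratified_regions
-- ===== SOURCE B (Python) =====
-- def startify_the_image(image, alpha, beta, M, N):
--     alpha = 1
--     """Only alpha=1 is supported."""
--     row_size, row_remainder = divmod(M, beta)
--     col_size, col_remainder = divmod(N, beta)
--     rows = [(k * row_size + min(k, row_remainder),
--              (k + 1) * row_size + min(k + 1, row_remainder) - 1)
--             for k in range(beta)]
--     cols = [(k * col_size + min(k, col_remainder),
--              (k + 1) * col_size + min(k + 1, col_remainder) - 1)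
--             for k in range(beta)]
--     return [[rs, cs, re, ce] for (rs, re) in rows for (cs, ce) in cols]
-- ===== Notes on version B (the rewrite author's own statement) =====
-- stated objective: alternative
-- what changed: Replaces the two threaded running accumulators (row_start/col_start) with closed-form boundary formulas k*size+min(k,remainder): row and column (start,end) pairs are precomputed as independent lists and the result is their cross product, so no state is carried between iterations.
import Mathlib
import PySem

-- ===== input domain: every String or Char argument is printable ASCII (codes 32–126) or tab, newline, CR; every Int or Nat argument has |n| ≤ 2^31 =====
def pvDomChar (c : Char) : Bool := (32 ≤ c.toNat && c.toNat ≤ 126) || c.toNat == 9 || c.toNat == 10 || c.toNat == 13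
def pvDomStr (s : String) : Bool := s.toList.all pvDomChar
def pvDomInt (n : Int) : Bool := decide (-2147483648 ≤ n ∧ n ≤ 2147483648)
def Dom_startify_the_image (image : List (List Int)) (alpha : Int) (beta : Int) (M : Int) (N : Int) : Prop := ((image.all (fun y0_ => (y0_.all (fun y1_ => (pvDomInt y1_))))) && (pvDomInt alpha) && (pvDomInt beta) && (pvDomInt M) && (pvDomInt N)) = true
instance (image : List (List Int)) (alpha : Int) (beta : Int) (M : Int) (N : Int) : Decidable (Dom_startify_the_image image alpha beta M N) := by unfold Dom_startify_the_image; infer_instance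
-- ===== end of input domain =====

-- B replaces A's threaded row_start/col_start accumulators by closed-form boundary
-- formulas k*size + min(k, remainder), precomputing row and column (start,end) lists
-- and taking their cross product (objective: alternative decomposition, same cost).


-- ===== PORT A =====
def startify_the_image (image : List (List Int)) (alpha : Int) (beta : Int) (M : Int) (N : Int) : List (List Int) :=
  let row_size := PySem.Int.floordiv M beta
  let col_size := PySem.Int.floordiv N beta
  let row_remainder := PySem.Int.mod M beta
  let col_remainder := PySem.Int.mod N beta
  let fin := (PySem.List.pyRange 0 beta 1).foldl
    (fun (st : List (List Int) × Int) i =>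
      let extra_row : Int := if i < row_remainder then 1 else 0
      let block_height := row_size + extra_row
      let row_end := st.2 + block_height - 1
      let inner := (PySem.List.pyRange 0 beta 1).foldl
        (fun (st2 : List (List Int) × Int) j =>
          let extra_col : Int := if j < col_remainder then 1 else 0
          let block_width := col_size + extra_col
          let col_end := st2.2 + block_width - 1
          (st2.1 ++ [[st.2, st2.2, row_end, col_end]], col_end + 1))
        (st.1, 0)
      (inner.1, row_end + 1))
    ([], 0)
  fin.1

-- ===== PORT B =====
-- closed-form boundary pairs: block k runs from k*size+min(k,rem) to (k+1)*size+min(k+1,rem)-1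
def pvBounds (beta size rem : Int) : List (Int × Int) :=
  (PySem.List.pyRange 0 beta 1).map
    (fun k => (k * size + min k rem, (k + 1) * size + min (k + 1) rem - 1))

def startify_the_image_alt (image : List (List Int)) (alpha : Int) (beta : Int) (M : Int) (N : Int) : List (List Int) :=
  let rd := (PySem.Int.divmod? M beta).getD (0, 0)
  let cd := (PySem.Int.divmod? N beta).getD (0, 0)
  let rows := pvBounds beta rd.1 rd.2
  let cols := pvBounds beta cd.1 cd.2
  rows.flatMap (fun rc => cols.map (fun cc => [rc.1, cc.1, rc.2, cc.2]))

-- ===== PRECONDITION & SPEC =====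
-- Python A raises ZeroDivisionError when beta = 0 (M // beta); that is all Pre_ excludes.
def Pre_startify_the_image (image : List (List Int)) (alpha : Int) (beta : Int) (M : Int) (N : Int) : Prop := beta ≠ 0
instance (image : List (List Int)) (alpha : Int) (beta : Int) (M : Int) (N : Int) : Decidable (Pre_startify_the_image image alpha beta M N) := by unfold Pre_startify_the_image; infer_instance
def pvWitness_startify_the_image : List (List Int) × Int × Int × Int × Int := ([[1, 2], [3, 4]], 1, 2, 5, 3)

def Spec_startify_the_image (image : List (List Int)) (alpha : Int) (beta : Int) (M : Int) (N : Int) (out : List (List Int)) : Prop := out = startify_the_image_alt image alpha beta M N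
instance (image : List (List Int)) (alpha : Int) (beta : Int) (M : Int) (N : Int) (out : List (List Int)) : Decidable (Spec_startify_the_image image alpha beta M N out) := by unfold Spec_startify_the_image; infer_instance

-- ===== CLAIM (what is proved, stated in full; the proofs are below) =====
def Claim_equal_startify_the_image : Prop := ∀ (image : List (List Int)) (alpha : Int) (beta : Int) (M : Int) (N : Int), Dom_startify_the_image image alpha beta M N → Pre_startify_the_image image alpha beta M N → Spec_startify_the_image image alpha beta M N (startify_the_image image alpha beta M N)

-- ===== LEMMAS AND PROOFS =====

-- prefix-sum identity for the closed-form start position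
theorem pvS_step (size rem j : Int) :
    j * size + min j rem + (size + (if j < rem then (1:Int) else 0)) - 1 + 1
      = (j + 1) * size + min (j + 1) rem := by
  rcases lt_or_ge j rem with h | h
  · rw [min_eq_left (by omega : j ≤ rem), min_eq_left (by omega : j + 1 ≤ rem), if_pos h]; ring
  · rw [min_eq_right (by omega : rem ≤ j), min_eq_right (by omega : rem ≤ j + 1), if_neg (by omega)]; ring

-- inner column loop of A = map of the closed form (col_start threads the closed form)
theorem pv_inner (size rem rs re : Int) (n : Nat) :
    ∀ (a c0 : Int) (acc : List (List Int)), c0 = a * size + min a rem →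
    (PySem.List.pyRange a (a + n) 1).foldl
      (fun (st2 : List (List Int) × Int) (j : Int) =>
        (st2.1 ++ [[rs, st2.2, re, st2.2 + (size + (if j < rem then (1:Int) else 0)) - 1]],
         st2.2 + (size + (if j < rem then (1:Int) else 0)) - 1 + 1))
      (acc, c0)
    = (acc ++ (PySem.List.pyRange a (a + n) 1).map
        (fun k => [rs, k * size + min k rem, re, (k + 1) * size + min (k + 1) rem - 1]),
       (a + n) * size + min (a + n) rem) := by
  induction n with
  | zero =>
    intro a c0 acc hc0
    rw [PySem.List.pyRange_one_eq_nil (by omega)]; simp [hc0]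
  | succ m ih =>
    intro a c0 acc hc0
    subst hc0
    rw [PySem.List.pyRange_one_cons (show a < a + ((m + 1 : Nat) : Int) by push_cast; omega)]
    simp only [List.foldl_cons, List.map_cons]
    have h4 : a * size + min a rem + (size + (if a < rem then (1:Int) else 0)) - 1
        = (a + 1) * size + min (a + 1) rem - 1 := by linarith [pvS_step size rem a]
    rw [h4]
    have e2 : a + ((m + 1 : Nat) : Int) = (a + 1) + (m : Nat) := by push_cast; ring
    rw [e2]
    rw [ih (a + 1) _ _ (by linarith [pvS_step size rem a])]
    simp [List.append_assoc]

-- outer row loop of A = flatMap of the closed form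
theorem pv_outer (rsz rrem csz crem b : Int) (hb : 0 ≤ b) (hc : 0 ≤ crem) (n : Nat) :
    ∀ (a r0 : Int) (acc : List (List Int)), r0 = a * rsz + min a rrem →
    (PySem.List.pyRange a (a + n) 1).foldl
      (fun (st : List (List Int) × Int) (i : Int) =>
        (((PySem.List.pyRange 0 b 1).foldl
           (fun (st2 : List (List Int) × Int) (j : Int) =>
             (st2.1 ++ [[st.2, st2.2, st.2 + (rsz + (if i < rrem then (1:Int) else 0)) - 1,
               st2.2 + (csz + (if j < crem then (1:Int) else 0)) - 1]],
              st2.2 + (csz + (if j < crem then (1:Int) else 0)) - 1 + 1))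
           (st.1, 0) : List (List Int) × Int).1,
         st.2 + (rsz + (if i < rrem then (1:Int) else 0)) - 1 + 1))
      (acc, r0)
    = (acc ++ (PySem.List.pyRange a (a + n) 1).flatMap
        (fun i => (PySem.List.pyRange 0 b 1).map
          (fun j => [i * rsz + min i rrem, j * csz + min j crem,
            (i + 1) * rsz + min (i + 1) rrem - 1, (j + 1) * csz + min (j + 1) crem - 1])),
       (a + n) * rsz + min (a + n) rrem) := by
  induction n with
  | zero =>
    intro a r0 acc hr0
    rw [show PySem.List.pyRange a (a + ((0 : Nat) : Int)) 1 = [] from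
      PySem.List.pyRange_one_eq_nil (by push_cast; omega)]
    simp [hr0]
  | succ m ih =>
    intro a r0 acc hr0
    subst hr0
    rw [show PySem.List.pyRange a (a + ((m + 1 : Nat) : Int)) 1
        = a :: PySem.List.pyRange (a + 1) (a + ((m + 1 : Nat) : Int)) 1 from
      PySem.List.pyRange_one_cons (by push_cast; omega)]
    simp only [List.foldl_cons, List.flatMap_cons]
    have h4 : a * rsz + min a rrem + (rsz + (if a < rrem then (1:Int) else 0)) - 1
        = (a + 1) * rsz + min (a + 1) rrem - 1 := by linarith [pvS_step rsz rrem a]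
    rw [h4]
    have hb' : b = 0 + (b.toNat : Nat) := by omega
    have hinner := pv_inner csz crem (a * rsz + min a rrem)
      ((a + 1) * rsz + min (a + 1) rrem - 1) b.toNat 0 0 acc
      (by rw [min_eq_left hc]; ring)
    rw [← hb'] at hinner
    rw [hinner]
    have e2 : a + ((m + 1 : Nat) : Int) = (a + 1) + (m : Nat) := by push_cast; ring
    rw [e2]
    rw [ih (a + 1) _ _ (by linarith [pvS_step rsz rrem a])]
    simp [List.append_assoc]

-- ===== VERDICT (by name: the statement is the Claim_ definition above) =====
theorem startify_the_image_spec : Claim_equal_startify_the_image := by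
  intro image alpha beta M N _ hpre
  have hβ0 : beta ≠ 0 := hpre
  unfold Spec_startify_the_image
  have hdm : PySem.Int.divmod? M beta = some (PySem.Int.floordiv M beta, PySem.Int.mod M beta) := by
    simp [PySem.Int.divmod?, PySem.Int.floordiv, PySem.Int.mod]
    exact hβ0
  have hdn : PySem.Int.divmod? N beta = some (PySem.Int.floordiv N beta, PySem.Int.mod N beta) := by
    simp [PySem.Int.divmod?, PySem.Int.floordiv, PySem.Int.mod]
    exact hβ0
  set rsz := PySem.Int.floordiv M beta with hrsz
  set rrem := PySem.Int.mod M beta with hrrem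
  set csz := PySem.Int.floordiv N beta with hcsz
  set crem := PySem.Int.mod N beta with hcrem
  have hA : startify_the_image image alpha beta M N =
      ((PySem.List.pyRange 0 beta 1).foldl
        (fun (st : List (List Int) × Int) (i : Int) =>
          (((PySem.List.pyRange 0 beta 1).foldl
             (fun (st2 : List (List Int) × Int) (j : Int) =>
               (st2.1 ++ [[st.2, st2.2, st.2 + (rsz + (if i < rrem then (1:Int) else 0)) - 1,
                 st2.2 + (csz + (if j < crem then (1:Int) else 0)) - 1]],
                st2.2 + (csz + (if j < crem then (1:Int) else 0)) - 1 + 1))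
             ((st.1, 0) : List (List Int) × Int)).1,
           st.2 + (rsz + (if i < rrem then (1:Int) else 0)) - 1 + 1))
        ([], 0)).1 := rfl
  have hB : startify_the_image_alt image alpha beta M N =
      (PySem.List.pyRange 0 beta 1).flatMap
        (fun i => (PySem.List.pyRange 0 beta 1).map
          (fun j => [i * rsz + min i rrem, j * csz + min j crem,
            (i + 1) * rsz + min (i + 1) rrem - 1, (j + 1) * csz + min (j + 1) crem - 1])) := by
    unfold startify_the_image_alt pvBounds
    rw [hdm, hdn]
    simp [List.flatMap_map, List.map_map, Function.comp_def]
  rw [hA, hB]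
  rcases lt_or_ge 0 beta with hβ | hβ
  · have hrr : 0 ≤ rrem := by
      rw [hrrem, PySem.Int.mod_eq_emod_of_pos hβ]; exact Int.emod_nonneg _ (by omega)
    have hcr : 0 ≤ crem := by
      rw [hcrem, PySem.Int.mod_eq_emod_of_pos hβ]; exact Int.emod_nonneg _ (by omega)
    have hb' : beta = 0 + (beta.toNat : Nat) := by omega
    have h := pv_outer rsz rrem csz crem beta (by omega) hcr beta.toNat 0 0 []
      (by rw [min_eq_left hrr]; ring)
    rw [← hb'] at h
    rw [h]
    simp
  · rw [PySem.List.pyRange_one_eq_nil (by omega)]; simp
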